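-- pv_equiv track=rewrite | github.com/baronet2/SCISOR | data/uniref_preprocessor.py | get_batches_from_sequences
-- ===== SOURCE A (Python) =====
-- def get_batches_from_sequences(sequences, batch_size, max_length=None):
--     """
--     Generates batches from a list of sequences.
--
--     Args:
--         sequences (List[str]): Protein sequences as strings.
--         batch_size (int): Number of sequences per batch.
--         max_length (int or None): Optional max length filter.
--
--     Yields:
--         List[List[str]]: A list containing one list of sequences (for compatibility).
--     """
--     standard_aas = set("ACDEFGHIKLMNPQRSTVWY")
--
--     def is_standard(seq):
--         return all(residue in standard_aas for residue in seq)
--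
--     batch = []
--     for seq in sequences:
--         if not is_standard(seq):
--             continue
--         if max_length is not None and len(seq) > max_length:
--             continue
--         batch.append(seq)
--         if len(batch) == batch_size:
--             yield [batch]  # Yield a batch wrapped in a list
--             batch = []
--     if batch:
--         yield [batch]
-- ===== SOURCE B (Python) =====
-- def get_batches_from_sequences(sequences, batch_size, max_length=None):
--     """Two-pass version: first filter all surviving sequences, then emit
--     batches by stride-slicing the filtered list."""
--     standard_aas = set("ACDEFGHIKLMNPQRSTVWY")
--     kept = [s for s in sequences
--             if all(r in standard_aas for r in s)
--             and (max_length is None or len(s) <= max_length)]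
--     i = 0
--     while i < len(kept):
--         yield [kept[i:i + batch_size]]
--         i += batch_size
-- ===== Notes on version B (the rewrite author's own statement) =====
-- stated objective: alternative
-- what changed: Replaces A's single streaming accumulate-and-flush loop by two explicit passes: a filtering comprehension that materializes the surviving sequences, then a stride-by-batch_size slicing loop that emits the batches.
-- outside the precondition, e.g. on get_batches_from_sequences(['AC'], 0, None): A returns [[['AC']]], B does not finish within the time limit; on get_batches_from_sequences(['AC'], -2, None): A returns [[['AC']]], B does not finish within the time limit
import Mathlib
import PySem

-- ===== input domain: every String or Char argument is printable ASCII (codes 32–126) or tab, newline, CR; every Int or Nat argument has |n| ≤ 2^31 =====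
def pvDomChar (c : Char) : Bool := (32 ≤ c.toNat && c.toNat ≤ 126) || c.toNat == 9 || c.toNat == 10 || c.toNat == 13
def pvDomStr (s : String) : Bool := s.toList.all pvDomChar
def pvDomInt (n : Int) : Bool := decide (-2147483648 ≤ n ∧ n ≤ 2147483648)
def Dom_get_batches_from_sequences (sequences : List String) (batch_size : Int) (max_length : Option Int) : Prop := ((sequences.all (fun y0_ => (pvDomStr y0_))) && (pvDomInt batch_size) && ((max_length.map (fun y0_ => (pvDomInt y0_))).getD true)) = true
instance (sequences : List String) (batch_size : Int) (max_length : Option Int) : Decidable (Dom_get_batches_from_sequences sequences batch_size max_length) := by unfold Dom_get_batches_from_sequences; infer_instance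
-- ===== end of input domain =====

-- B replaces A's streaming accumulate-and-flush loop by two passes (filter, then stride-slice); alternative decomposition, same cost.


-- ===== PORT A =====
-- standard_aas = set("ACDEFGHIKLMNPQRSTVWY")  (the same set literal appears in both Pythons)
def pvStandardAAs : List Char := PySem.Set.ofList "ACDEFGHIKLMNPQRSTVWY".toList

-- is_standard(seq): all(residue in standard_aas for residue in seq)
def pvIsStandard (seq : String) : Bool := seq.toList.all (fun r => pvStandardAAs.contains r)

-- the body of A's for-loop (two 'continue' guards, append, flush on a full batch)
def pvStepA (max_length : Option Int) (batch_size : Int)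
    (st : List (List (List String)) × List String) (seq : String) :
    List (List (List String)) × List String :=
  if ¬ pvIsStandard seq then st
  else if (match max_length with | some m => decide (PySem.Str.len seq > m) | none => false) then st
  else
    let batch := st.2 ++ [seq]
    if (batch.length : Int) = batch_size then (st.1 ++ [[batch]], [])
    else (st.1, batch)

-- the trailing 'if batch: yield [batch]'
def pvFlush (st : List (List (List String)) × List String) : List (List (List String)) :=
  if st.2.isEmpty then st.1 else st.1 ++ [[st.2]]

def get_batches_from_sequences (sequences : List String) (batch_size : Int) (max_length : Option Int) : List (List (List String)) :=
  pvFlush (sequences.foldl (pvStepA max_length batch_size) ([], []))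

-- ===== PORT B =====
-- the comprehension's guard: standard residues only, and within max_length when given
def pvKeep (max_length : Option Int) (s : String) : Bool :=
  s.toList.all (fun r => pvStandardAAs.contains r) &&
  (match max_length with | none => true | some m => decide (PySem.Str.len s ≤ m))

-- 'i = 0; while i < len(kept): yield [kept[i:i+batch_size]]; i += batch_size';
-- the fuel argument only makes the recursion total (kept.length + 1 iterations always suffice on Pre_)
def pvStrideLoop (kept : List String) (bs : Int) : Nat → Int → List (List (List String))
  | 0, _ => []
  | fuel + 1, i =>
    if i < (kept.length : Int) then
      [PySem.List.slice kept (some i) (some (i + bs))] :: pvStrideLoop kept bs fuel (i + bs)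
    else []

def get_batches_from_sequences_alt (sequences : List String) (batch_size : Int) (max_length : Option Int) : List (List (List String)) :=
  let kept := sequences.filter (pvKeep max_length)
  pvStrideLoop kept batch_size (kept.length + 1) 0

-- ===== PRECONDITION & SPEC =====
-- Pre_ excludes batch_size ≤ 0 when at least one sequence survives the filters: there A's single
-- flush of everything is an accident of its 'len(batch) == batch_size' check and B's stride loop
-- does not terminate (when nothing survives, both yield nothing, so those inputs stay inside).
def Pre_get_batches_from_sequences (sequences : List String) (batch_size : Int) (max_length : Option Int) : Prop :=
  1 ≤ batch_size ∨ sequences.filter (pvKeep max_length) = []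
instance (sequences : List String) (batch_size : Int) (max_length : Option Int) : Decidable (Pre_get_batches_from_sequences sequences batch_size max_length) := by unfold Pre_get_batches_from_sequences; infer_instance

def pvWitness_get_batches_from_sequences : List String × Int × Option Int := (["ACD", "WW"], 2, none)

def Spec_get_batches_from_sequences (sequences : List String) (batch_size : Int) (max_length : Option Int) (out : List (List (List String))) : Prop := out = get_batches_from_sequences_alt sequences batch_size max_length
instance (sequences : List String) (batch_size : Int) (max_length : Option Int) (out : List (List (List String))) : Decidable (Spec_get_batches_from_sequences sequences batch_size max_length out) := by unfold Spec_get_batches_from_sequences; infer_instance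

-- ===== CLAIM (what is proved, stated in full; the proofs are below) =====
def Claim_equal_get_batches_from_sequences : Prop := ∀ (sequences : List String) (batch_size : Int) (max_length : Option Int), Dom_get_batches_from_sequences sequences batch_size max_length → Pre_get_batches_from_sequences sequences batch_size max_length → Spec_get_batches_from_sequences sequences batch_size max_length (get_batches_from_sequences sequences batch_size max_length)

-- ===== LEMMAS AND PROOFS =====

-- reference chunking: groups of b'+1 consecutive survivors, each wrapped in a singleton list
def pvChunks (b' : Nat) : List String → List (List (List String))
  | [] => []
  | x :: xs => [x :: xs.take b'] :: pvChunks b' (xs.drop b')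
  termination_by l => l.length
  decreasing_by simp

-- A's loop body once the two skip guards have fired
def pvBody (batch_size : Int) (st : List (List (List String)) × List String) (seq : String) :
    List (List (List String)) × List String :=
  let batch := st.2 ++ [seq]
  if (batch.length : Int) = batch_size then (st.1 ++ [[batch]], [])
  else (st.1, batch)

theorem pvChunks_nil (b' : Nat) : pvChunks b' [] = [] := by rw [pvChunks.eq_def]

theorem pvChunks_cons (b' : Nat) (x : String) (xs : List String) :
    pvChunks b' (x :: xs) = [x :: xs.take b'] :: pvChunks b' (xs.drop b') := by
  rw [pvChunks.eq_def]

theorem pvChunks_eq_cons (b' : Nat) (l : List String) (h : l ≠ []) :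
    pvChunks b' l = [l.take (b' + 1)] :: pvChunks b' (l.drop (b' + 1)) := by
  cases l with
  | nil => exact absurd rfl h
  | cons x xs => rw [pvChunks_cons]; simp

-- A's skip conditions, fused, are exactly B's keep predicate
theorem stepA_as_filter (max_length : Option Int) (bs : Int)
    (st : List (List (List String)) × List String) (s : String) :
    pvStepA max_length bs st s = if pvKeep max_length s then pvBody bs st s else st := by
  unfold pvStepA pvKeep pvBody
  have hstd : (s.toList.all fun r => pvStandardAAs.contains r) = pvIsStandard s := rfl
  rw [hstd]
  cases h : pvIsStandard s
  · simp
  · cases max_length with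
    | none => simp
    | some m =>
      by_cases hm : m < ((s.length : Int))
      · simp [PySem.Str.len_eq, hm, not_le_of_gt hm]
      · simp [PySem.Str.len_eq, hm, not_lt.mp hm]

-- A's loop over the already-filtered list, with its final flush, is exactly pvChunks
theorem foldA_chunks (b' : Nat) (l : List String) :
    ∀ (acc : List (List (List String))) (p : List String), p.length < b' + 1 →
    pvFlush (l.foldl (pvBody ((b' : Int) + 1)) (acc, p)) = acc ++ pvChunks b' (p ++ l) := by
  induction l with
  | nil =>
    intro acc p hp
    cases p with
    | nil => simp [pvFlush, pvChunks_nil]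
    | cons q qs =>
      have hq : qs.length < b' := by simpa using hp
      have ht : qs.take b' = qs := List.take_of_length_le (by omega)
      have hd : qs.drop b' = [] := List.drop_eq_nil_of_le (by omega)
      simp [pvFlush, pvChunks_cons, ht, hd, pvChunks_nil]
  | cons s rest ih =>
    intro acc p hp
    rw [List.foldl_cons]
    by_cases hfull : (((p ++ [s]).length : Int)) = ((b' : Int) + 1)
    · have hlen : p.length = b' := by
        have h2 : ((p.length : Int) + 1) = (b' : Int) + 1 := by simpa using hfull
        omega
      have hstep : pvBody ((b' : Int) + 1) (acc, p) s = (acc ++ [[p ++ [s]]], []) := by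
        simp [pvBody, hlen]
      rw [hstep, ih (acc ++ [[p ++ [s]]]) [] (by simp)]
      have hne : p ++ s :: rest ≠ [] := by simp
      rw [pvChunks_eq_cons b' _ hne]
      have hsplit : p ++ s :: rest = (p ++ [s]) ++ rest := by simp
      have htake : (p ++ s :: rest).take (b' + 1) = p ++ [s] := by
        rw [hsplit, List.take_append_of_le_length (by simp; omega),
          List.take_of_length_le (by simp; omega)]
      have hdrop : (p ++ s :: rest).drop (b' + 1) = rest := by
        rw [hsplit, show b' + 1 = (p ++ [s]).length from by simp [hlen], List.drop_left]
      rw [htake, hdrop]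
      simp
    · have hpb : p.length ≠ b' := fun h => hfull (by simp [h])
      have hlt : (p ++ [s]).length < b' + 1 := by simp; omega
      have hstep : pvBody ((b' : Int) + 1) (acc, p) s = (acc, p ++ [s]) := by
        simp [pvBody, hpb]
      rw [hstep, ih acc (p ++ [s]) hlt]
      simp

-- B's stride loop computes pvChunks of what remains, whenever the fuel covers the remainder
theorem strideLoop_chunks (kept : List String) (b' : Nat) :
    ∀ (fuel : Nat) (j : Nat), kept.length - j ≤ fuel →
    pvStrideLoop kept ((b' : Int) + 1) fuel (j : Int) = pvChunks b' (kept.drop j) := by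
  intro fuel
  induction fuel with
  | zero =>
    intro j hj
    have h : kept.length ≤ j := by omega
    rw [List.drop_eq_nil_of_le h, pvChunks_nil]
    rfl
  | succ n ih =>
    intro j hj
    by_cases hlt : (j : Int) < (kept.length : Int)
    · have hjl : j < kept.length := by exact_mod_cast hlt
      have hslice : PySem.List.slice kept (some (j : Int)) (some ((j : Int) + ((b' : Int) + 1)))
          = (kept.drop j).take (b' + 1) := by
        have h := PySem.List.slice_natCast_add kept j (b' + 1)
        push_cast at h
        exact h
      have hstep : ((j : Int) + ((b' : Int) + 1)) = (((j + (b' + 1) : Nat)) : Int) := by push_cast; ring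
      simp only [pvStrideLoop, if_pos hlt, hslice]
      rw [hstep, ih (j + (b' + 1)) (by omega)]
      have hne : kept.drop j ≠ [] := by
        rw [Ne, List.drop_eq_nil_iff]; omega
      rw [pvChunks_eq_cons b' _ hne, List.drop_drop]
    · have h : kept.length ≤ j := by exact_mod_cast not_lt.mp hlt
      rw [List.drop_eq_nil_of_le h, pvChunks_nil]
      simp [pvStrideLoop, hlt]

-- ===== VERDICT (by name: the statement is the Claim_ definition above) =====
theorem get_batches_from_sequences_spec : Claim_equal_get_batches_from_sequences := by
  intro sequences batch_size max_length _hdom hpre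
  unfold Spec_get_batches_from_sequences
  rcases hpre with hbs | hkept
  case inr =>
    unfold get_batches_from_sequences get_batches_from_sequences_alt
    have hfun0 : pvStepA max_length batch_size =
        (fun st s => if pvKeep max_length s then pvBody batch_size st s else st) := by
      funext st s; exact stepA_as_filter max_length batch_size st s
    rw [hfun0, ← List.foldl_filter, hkept]
    simp [pvFlush, pvStrideLoop]
  obtain ⟨b', hb⟩ : ∃ b' : Nat, batch_size = (b' : Int) + 1 := by
    refine ⟨(batch_size - 1).toNat, ?_⟩; omega
  subst hb
  have hfun : pvStepA max_length ((b' : Int) + 1) =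
      (fun st s => if pvKeep max_length s then pvBody ((b' : Int) + 1) st s else st) := by
    funext st s; exact stepA_as_filter max_length ((b' : Int) + 1) st s
  unfold get_batches_from_sequences get_batches_from_sequences_alt
  rw [hfun, ← List.foldl_filter]
  have hA := foldA_chunks b' (sequences.filter (pvKeep max_length)) [] [] (by simp)
  simp only [List.nil_append] at hA
  rw [hA]
  have hB := strideLoop_chunks (sequences.filter (pvKeep max_length)) b'
    ((sequences.filter (pvKeep max_length)).length + 1) 0 (by omega)
  simp only [Nat.cast_zero, List.drop_zero] at hB
  exact hB.symm
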